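-- pv_equiv track=rewrite | github.com/cirosantilli/project-euler-solvers | solvers/127.py | solve
-- ===== SOURCE A (Python) =====
-- def gcd(a: int, b: int) -> int:
--     while a:
--         a, b = b % a, a
--     return b
--
-- def solve(limit: int) -> int:
--     rad = [1] * limit
--     for i in range(2, limit):
--         if rad[i] > 1:
--             continue
--         for j in range(i, limit, i):
--             rad[j] *= i
--
--     total = 0
--     for a in range(1, limit // 2):
--         increment_b = 2 if a % 2 == 0 else 1
--         b = a + 1
--         while a + b < limit:
--             c = a + b
--             prod_rad = rad[a] * rad[b] * rad[c]
--             if prod_rad < c: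
--                 if gcd(rad[a], rad[b]) == 1:
--                     total += c
--             b += increment_b
--     return total
-- ===== SOURCE B (Python) =====
-- def gcd(a: int, b: int) -> int:
--     while a:
--         a, b = b % a, a
--     return b
--
-- def solve(limit: int) -> int:
--     rad = [1] * limit
--     for i in range(2, limit):
--         if rad[i] > 1:
--             continue
--         for j in range(i, limit, i):
--             rad[j] *= i
--
--     # indices ordered by increasing radical, so each inner scan can stop
--     # as soon as rad[a] * rad[c] >= c (rad[b] >= 1 makes prod_rad >= c then)
--     order = sorted(range(1, limit), key=lambda k: rad[k])
--
--     total = 0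
--     for c in range(3, limit):
--         rc = rad[c]
--         for a in order:
--             ra = rad[a]
--             if ra * rc >= c:
--                 break
--             if 2 * a >= c:
--                 continue
--             if a % 2 == 0 and c % 2 == 0:
--                 continue  # a and b = c - a both even: rad's share the factor 2
--             rb = rad[c - a]
--             if ra * rb * rc < c and gcd(ra, rb) == 1:
--                 total += c
--     return total
-- ===== Notes on version B (the rewrite author's own statement) =====
-- stated objective: faster
-- what changed: B keeps the radical sieve but pre-sorts the indices 1..limit-1 by increasing radical and, for each candidate sum c, scans only that sorted order, breaking off as soon as rad[a]*rad[c] >= c (all remaining radicals are at least as large and rad[b] >= 1, so no later split can be a hit), instead of A's full quadratic scan over every pair (a,b).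
import Mathlib
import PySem

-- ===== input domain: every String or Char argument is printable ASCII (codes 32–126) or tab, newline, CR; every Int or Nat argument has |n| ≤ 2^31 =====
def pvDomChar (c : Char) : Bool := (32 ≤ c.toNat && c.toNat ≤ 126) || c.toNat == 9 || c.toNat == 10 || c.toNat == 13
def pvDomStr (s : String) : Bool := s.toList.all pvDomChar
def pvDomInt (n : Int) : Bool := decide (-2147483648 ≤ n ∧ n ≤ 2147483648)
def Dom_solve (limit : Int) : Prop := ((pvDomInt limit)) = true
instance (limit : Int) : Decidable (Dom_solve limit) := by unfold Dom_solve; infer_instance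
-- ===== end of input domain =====

-- B keeps the radical sieve but replaces A's quadratic pair scan by iterating, for each sum c,
-- over the indices SORTED BY INCREASING RADICAL and breaking off as soon as rad[a]*rad[c] >= c
-- (then rad[a]*rad[b]*rad[c] >= c for every remaining a, since radicals are >= 1 and the order is
-- monotone) — measurably faster at the generated sizes.

-- ===== PORT A =====
-- Source A's gcd: 'while a: a, b = b % a, a; return b' (identical lines in Source B, shared helper).
def pyGcd (a b : Int) : Int :=
  if a ≠ 0 then pyGcd (PySem.Int.mod b a) a else b
termination_by a.natAbs
decreasing_by
  rename_i h
  rcases lt_or_gt_of_ne h with hneg | hpos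
  · have := PySem.Int.mod_neg_bounds b hneg
    omega
  · have h1 := PySem.Int.mod_nonneg b hpos
    have h2 := PySem.Int.mod_lt b hpos
    omega

-- the radical sieve, identical lines in Source A and Source B (shared helper).
-- every index used (i, j) is in range 0 ≤ · < limit, so the total pyGetD/pySetD are exact here.
def radSieve (limit : Int) : List Int :=
  (PySem.List.pyRange 2 limit 1).foldl
    (fun rad i =>
      if PySem.List.pyGetD rad i 1 > 1 then rad
      else (PySem.List.pyRange i limit i).foldl
        (fun r j => PySem.List.pySetD r j (PySem.List.pyGetD r j 1 * i)) rad)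
    (List.replicate limit.toNat 1)

-- the while-loop over b (c = a + b inlined); returns the amount it adds to total
def solveWhile (rad : List Int) (limit a b : Int) (evenA : Bool) : Int :=
  if a + b < limit then
    (if PySem.List.pyGetD rad a 1 * PySem.List.pyGetD rad b 1 * PySem.List.pyGetD rad (a + b) 1 < a + b then
       (if pyGcd (PySem.List.pyGetD rad a 1) (PySem.List.pyGetD rad b 1) = 1 then a + b else 0)
     else 0)
    + solveWhile rad limit a (b + (if evenA then 2 else 1)) evenA
  else 0
termination_by (limit - a - b).toNat
decreasing_by cases evenA <;> simp_all <;> omega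

def solve (limit : Int) : Int :=
  let rad := radSieve limit
  (PySem.List.pyRange 1 (PySem.Int.floordiv limit 2) 1).foldl
    (fun total a => total + solveWhile rad limit a (a + 1) (PySem.Int.mod a 2 == 0))
    0

-- ===== PORT B =====
-- Source B's inner 'for a in order' loop with its break/continues, threading total
def innerB (rad : List Int) (c rc : Int) : List Int → Int → Int
  | [], total => total
  | a :: rest, total =>
    if PySem.List.pyGetD rad a 1 * rc ≥ c then total           -- break
    else innerB rad c rc rest
      (if 2 * a ≥ c then total                                  -- continue: a ≥ b
       else if PySem.Int.mod a 2 = 0 ∧ PySem.Int.mod c 2 = 0 then total  -- continue: a, b both even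
       else if PySem.List.pyGetD rad a 1 * PySem.List.pyGetD rad (c - a) 1 * rc < c
               ∧ pyGcd (PySem.List.pyGetD rad a 1) (PySem.List.pyGetD rad (c - a) 1) = 1
            then total + c else total)

def solve_alt (limit : Int) : Int :=
  let rad := radSieve limit
  -- Source B: order = sorted(range(1, limit), key=lambda k: rad[k])
  let order := PySem.List.sorted (PySem.List.pyRange 1 limit 1) (fun k => PySem.List.pyGetD rad k 1)
  (PySem.List.pyRange 3 limit 1).foldl
    (fun total c => innerB rad c (PySem.List.pyGetD rad c 1) order total)
    0

-- ===== PRECONDITION & SPEC =====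
def Spec_solve (limit : Int) (out : Int) : Prop := out = solve_alt limit
instance (limit : Int) (out : Int) : Decidable (Spec_solve limit out) := by unfold Spec_solve; infer_instance

-- ===== CLAIM (what is proved, stated in full; the proofs are below) =====
def Claim_equal_solve : Prop := ∀ (limit : Int), Dom_solve limit → Spec_solve limit (solve limit)

-- ===== LEMMAS AND PROOFS =====

-- the per-pair contribution: c = a + b if the abc-condition holds, else 0
def pvF (rad : List Int) (a b : Int) : Int :=
  if PySem.List.pyGetD rad a 1 * PySem.List.pyGetD rad b 1 * PySem.List.pyGetD rad (a + b) 1 < a + b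
     ∧ pyGcd (PySem.List.pyGetD rad a 1) (PySem.List.pyGetD rad b 1) = 1
  then a + b else 0

-- B's per-(c,a) contribution, all guards folded into one condition
def pvG (rad : List Int) (c a : Int) : Int :=
  if 2 * a < c ∧ ¬(PySem.Int.mod a 2 = 0 ∧ PySem.Int.mod c 2 = 0)
     ∧ PySem.List.pyGetD rad a 1 * PySem.List.pyGetD rad (c - a) 1 * PySem.List.pyGetD rad c 1 < c
     ∧ pyGcd (PySem.List.pyGetD rad a 1) (PySem.List.pyGetD rad (c - a) 1) = 1
  then c else 0

-- the common pair set: 1 ≤ a < b, a + b < L, not both even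
noncomputable def pvS (L : Int) : Finset (Int × Int) :=
  (Finset.Ico 1 L ×ˢ Finset.Ico 1 L).filter
    (fun p => p.1 < p.2 ∧ p.1 + p.2 < L ∧ (p.1 % 2 = 1 ∨ p.2 % 2 = 1))

lemma pv_ite_and {X Y : Prop} [Decidable X] [Decidable Y] (v : Int) :
    (if X then (if Y then v else 0) else 0) = if X ∧ Y then v else 0 := by
  split_ifs <;> tauto

lemma pv_Ico_insert (a b : Int) (h : a < b) :
    Finset.Ico a b = insert a (Finset.Ico (a + 1) b) := by
  ext t; simp [Finset.mem_Ico]; omega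

-- a positive-step range, mapped and summed, is the filtered-Ico sum
lemma pv_stride_sum (g : Int → Int) (lo hi s : Int) (hs : 0 < s) :
    ((PySem.List.pyRange lo hi s).map g).sum
      = ∑ t ∈ (Finset.Ico lo hi).filter (fun t => s ∣ t - lo), g t := by
  have hnd : (PySem.List.pyRange lo hi s).Nodup := by
    rw [PySem.List.pyRange_of_pos lo hi hs]
    refine List.nodup_range.map ?_
    intro x y hxy
    simp only at hxy
    have h1 : s * (x : Int) = s * (y : Int) := by omega
    have h2 := mul_left_cancel₀ (ne_of_gt hs) h1
    exact_mod_cast h2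
  rw [← List.sum_toFinset g hnd]
  refine Finset.sum_congr ?_ (fun _ _ => rfl)
  ext t
  simp only [List.mem_toFinset, PySem.List.mem_pyRange_iff_of_pos hs, Finset.mem_filter,
    Finset.mem_Ico]
  tauto

lemma pv_filter2_insert (b m : Int) (h : b < m) :
    (Finset.Ico b m).filter (fun t => (2:Int) ∣ t - b)
      = insert b ((Finset.Ico (b + 2) m).filter (fun t => (2:Int) ∣ t - (b + 2))) := by
  ext t
  simp only [Finset.mem_filter, Finset.mem_insert, Finset.mem_Ico]
  omega

lemma pv_mod2_true (a : Int) (h : (2:Int) ∣ a) : (PySem.Int.mod a 2 == 0) = true := by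
  simp only [beq_iff_eq, PySem.Int.mod_eq_zero_iff_dvd]
  exact h

lemma pv_mod2_false (a : Int) (h : ¬ (2:Int) ∣ a) : (PySem.Int.mod a 2 == 0) = false := by
  simp only [beq_eq_false_iff_ne, Ne, PySem.Int.mod_eq_zero_iff_dvd]
  exact h

-- the while-loop is the filtered-Ico sum of pvF
lemma pv_while_eq (rad : List Int) (L a : Int) (ea : Bool) (b : Int) :
    solveWhile rad L a b ea
      = ∑ t ∈ (Finset.Ico b (L - a)).filter (fun t => (if ea then (2:Int) else 1) ∣ t - b),
          pvF rad a t := by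
  cases ea
  · induction b using solveWhile.induct (limit := L) (a := a) (evenA := false) with
    | case1 b hlt ih =>
        rw [solveWhile, if_pos hlt, pv_ite_and]
        simp only [Bool.false_eq_true, dite_false, if_false] at ih ⊢
        rw [ih]
        have hset : (Finset.Ico b (L - a)).filter (fun t => (1:Int) ∣ t - b)
            = Finset.Ico b (L - a) := Finset.filter_true_of_mem (fun t _ => one_dvd _)
        have hset' : (Finset.Ico (b + 1) (L - a)).filter (fun t => (1:Int) ∣ t - (b + 1))
            = Finset.Ico (b + 1) (L - a) := Finset.filter_true_of_mem (fun t _ => one_dvd _)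
        rw [hset, hset', pv_Ico_insert b (L - a) (by omega),
          Finset.sum_insert (by simp [Finset.mem_Ico])]
        rfl
    | case2 b hge =>
        rw [solveWhile, if_neg hge]
        rw [Finset.Ico_eq_empty (by omega)]
        simp
  · induction b using solveWhile.induct (limit := L) (a := a) (evenA := true) with
    | case1 b hlt ih =>
        rw [solveWhile, if_pos hlt, pv_ite_and]
        simp only [dite_true, if_true] at ih ⊢
        rw [ih, pv_filter2_insert b (L - a) (by omega),
          Finset.sum_insert (by simp only [Finset.mem_filter, Finset.mem_Ico]; omega)]
        rfl
    | case2 b hge =>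
        rw [solveWhile, if_neg hge]
        rw [Finset.Ico_eq_empty (by omega)]
        simp

lemma pv_A_eq (L : Int) : solve L = ∑ p ∈ pvS L, pvF (radSieve L) p.1 p.2 := by
  have hdiv : PySem.Int.floordiv L 2 = L / 2 := PySem.Int.floordiv_eq_ediv_of_pos (by norm_num)
  unfold solve
  simp only []
  rw [PySem.List.foldl_add, pv_stride_sum _ _ _ _ one_pos, zero_add,
    Finset.filter_true_of_mem (fun t _ => one_dvd _)]
  calc ∑ a ∈ Finset.Ico (1:Int) (PySem.Int.floordiv L 2),
        solveWhile (radSieve L) L a (a + 1) (PySem.Int.mod a 2 == 0)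
      = ∑ a ∈ Finset.Ico (1:Int) (PySem.Int.floordiv L 2),
          ∑ t ∈ (Finset.Ico 1 L).filter
            (fun t => a < t ∧ a + t < L ∧ (a % 2 = 1 ∨ t % 2 = 1)), pvF (radSieve L) a t := by
        refine Finset.sum_congr rfl (fun a ha => ?_)
        rw [hdiv] at ha
        simp only [Finset.mem_Ico] at ha
        rw [pv_while_eq]
        refine Finset.sum_congr ?_ (fun _ _ => rfl)
        by_cases h2 : (2:Int) ∣ a
        · rw [pv_mod2_true a h2]
          ext t
          simp [Finset.mem_Ico]
          omega
        · rw [pv_mod2_false a h2]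
          ext t
          simp [Finset.mem_Ico]
          omega
    _ = ∑ a ∈ Finset.Ico (1:Int) L,
          ∑ t ∈ (Finset.Ico 1 L).filter
            (fun t => a < t ∧ a + t < L ∧ (a % 2 = 1 ∨ t % 2 = 1)), pvF (radSieve L) a t := by
        refine Finset.sum_subset ?_ ?_
        · rw [hdiv]; intro x hx; simp only [Finset.mem_Ico] at *; omega
        · intro a ha hna
          rw [hdiv] at hna
          simp only [Finset.mem_Ico] at ha hna
          rw [Finset.filter_eq_empty_iff.2 ?_, Finset.sum_empty]
          intro t ht
          simp only [Finset.mem_Ico] at ht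
          omega
    _ = ∑ p ∈ pvS L, pvF (radSieve L) p.1 p.2 := by
        unfold pvS
        have hprod := Finset.sum_product' (s := Finset.Ico (1:Int) L) (t := Finset.Ico (1:Int) L)
            (f := fun a t => if a < t ∧ a + t < L ∧ (a % 2 = 1 ∨ t % 2 = 1)
                  then pvF (radSieve L) a t else 0)
        rw [Finset.sum_filter, hprod]
        exact Finset.sum_congr rfl (fun a _ => Finset.sum_filter _ _)

-- ---- B side ----

-- a foldl preserves an invariant closed under every step on a list element
lemma pv_foldl_inv {α β : Type} (P : β → Prop) (f : β → α → β) (l : List α) (init : β)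
    (h0 : P init) (hstep : ∀ b a, a ∈ l → P b → P (f b a)) : P (l.foldl f init) :=
  List.foldlRecOn l f h0 (fun b hb a ha => hstep b a ha hb)

lemma pv_getD_one_le (r : List Int) (h : ∀ x ∈ r, 1 ≤ x) (j : Int) :
    1 ≤ PySem.List.pyGetD r j 1 := by
  unfold PySem.List.pyGetD
  cases hg : PySem.List.pyGet? r j with
  | none => simp
  | some x => simpa using h x (PySem.List.mem_of_pyGet?_eq_some r hg)

-- every entry of the radical sieve is ≥ 1
lemma pv_rad_all_pos (L : Int) : ∀ x ∈ radSieve L, 1 ≤ x := by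
  unfold radSieve
  refine pv_foldl_inv (fun r => ∀ x ∈ r, 1 ≤ x) _ _ _ ?_ ?_
  · intro x hx
    exact (List.eq_of_mem_replicate hx).ge
  · intro r i hi hr
    have hi2 : 2 ≤ i := (PySem.List.mem_pyRange_one.1 hi).1
    split
    · exact hr
    · refine pv_foldl_inv (fun r => ∀ x ∈ r, 1 ≤ x) _ _ _ hr ?_
      intro r' j hj hr' x hx
      have hj0 : 0 ≤ j := by
        have := (PySem.List.mem_pyRange_iff_of_pos (by omega) j).1 hj
        omega
      rw [PySem.List.pySetD_of_nonneg r' _ hj0] at hx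
      rcases List.mem_or_eq_of_mem_set hx with hmem | hnew
      · exact hr' x hmem
      · have h1 := pv_getD_one_le r' hr' j
        nlinarith

lemma pv_rad_pos (L j : Int) : 1 ≤ PySem.List.pyGetD (radSieve L) j 1 :=
  pv_getD_one_le _ (pv_rad_all_pos L) j

-- Source B's inner loop (with its break) sums pvG over the whole sorted list
lemma pv_innerB_eq (L c : Int) (l : List Int)
    (hs : l.Pairwise (fun x y =>
      PySem.List.pyGetD (radSieve L) x 1 ≤ PySem.List.pyGetD (radSieve L) y 1)) (t : Int) :
    innerB (radSieve L) c (PySem.List.pyGetD (radSieve L) c 1) l t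
      = t + (l.map (pvG (radSieve L) c)).sum := by
  induction l generalizing t with
  | nil => simp [innerB]
  | cons a rest ih =>
      rw [innerB]
      split
      · rename_i hbr
        -- break: every remaining contribution is 0
        have hzero : ∀ x ∈ a :: rest, pvG (radSieve L) c x = 0 := by
          intro x hx
          have hax : PySem.List.pyGetD (radSieve L) a 1 ≤ PySem.List.pyGetD (radSieve L) x 1 := by
            rcases hx with _ | hx
            · exact le_refl _
            · exact (List.pairwise_cons.1 hs).1 x (by assumption)
          unfold pvG
          rw [if_neg]
          rintro ⟨-, -, hlt, -⟩
          have h1 := pv_rad_pos L a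
          have h2 := pv_rad_pos L x
          have h3 := pv_rad_pos L (c - x)
          have h4 := pv_rad_pos L c
          have k2 : PySem.List.pyGetD (radSieve L) a 1 * PySem.List.pyGetD (radSieve L) c 1
              ≤ PySem.List.pyGetD (radSieve L) x 1 * PySem.List.pyGetD (radSieve L) c 1 :=
            mul_le_mul_of_nonneg_right hax (by linarith)
          have k3 : PySem.List.pyGetD (radSieve L) x 1 * PySem.List.pyGetD (radSieve L) c 1
              ≤ PySem.List.pyGetD (radSieve L) x 1 * PySem.List.pyGetD (radSieve L) c 1
                  * PySem.List.pyGetD (radSieve L) (c - x) 1 :=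
            le_mul_of_one_le_right (by nlinarith) h3
          nlinarith
        have hm : ∀ y ∈ List.map (pvG (radSieve L) c) (a :: rest), y = 0 := by
          intro y hy
          rcases List.mem_map.1 hy with ⟨x, hx, rfl⟩
          exact hzero x hx
        rw [List.sum_eq_zero hm]
        omega
      · rename_i hbr
        rw [ih (List.pairwise_cons.1 hs).2]
        have hstep : (if 2 * a ≥ c then t
            else if PySem.Int.mod a 2 = 0 ∧ PySem.Int.mod c 2 = 0 then t
            else if PySem.List.pyGetD (radSieve L) a 1 * PySem.List.pyGetD (radSieve L) (c - a) 1
                      * PySem.List.pyGetD (radSieve L) c 1 < c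
                    ∧ pyGcd (PySem.List.pyGetD (radSieve L) a 1)
                        (PySem.List.pyGetD (radSieve L) (c - a) 1) = 1
                 then t + c else t)
            = t + pvG (radSieve L) c a := by
          unfold pvG
          split_ifs <;> first | rfl | omega
        rw [hstep]
        simp only [List.map_cons, List.sum_cons]
        ring

-- pvG is the filtered pvF contribution
lemma pv_pvG_eq (L c a : Int) :
    pvG (radSieve L) c a
      = if a < c - a ∧ (c % 2 = 1 ∨ a % 2 = 1) then pvF (radSieve L) a (c - a) else 0 := by
  unfold pvG pvF
  have hx : a + (c - a) = c := by ring
  rw [hx, pv_ite_and]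
  refine if_congr ?_ rfl rfl
  have hpar : (¬(PySem.Int.mod a 2 = 0 ∧ PySem.Int.mod c 2 = 0)) ↔ (c % 2 = 1 ∨ a % 2 = 1) := by
    simp only [PySem.Int.mod_eq_zero_iff_dvd]
    omega
  have h2a : (2 * a < c) ↔ (a < c - a) := by omega
  tauto

lemma pv_B_eq (L : Int) : solve_alt L = ∑ p ∈ pvS L, pvF (radSieve L) p.1 p.2 := by
  unfold solve_alt
  simp only []
  have hfun : (fun (total c : Int) =>
        innerB (radSieve L) c (PySem.List.pyGetD (radSieve L) c 1)
          (PySem.List.sorted (PySem.List.pyRange 1 L 1)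
            (fun k => PySem.List.pyGetD (radSieve L) k 1)) total)
      = fun total c => total + ((PySem.List.pyRange 1 L 1).map (pvG (radSieve L) c)).sum := by
    funext total c
    rw [pv_innerB_eq L c _ (PySem.List.sorted_pairwise _ _) total]
    congr 1
    exact ((PySem.List.sorted_perm _ _ _).map _).sum_eq
  rw [hfun, PySem.List.foldl_add, pv_stride_sum _ _ _ _ one_pos, zero_add,
    Finset.filter_true_of_mem (fun t _ => one_dvd _)]
  calc ∑ c ∈ Finset.Ico (3:Int) L, ((PySem.List.pyRange 1 L 1).map (pvG (radSieve L) c)).sum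
      = ∑ c ∈ Finset.Ico (3:Int) L,
          ∑ a ∈ (Finset.Ico (1:Int) L).filter
            (fun a => a < c - a ∧ (c % 2 = 1 ∨ a % 2 = 1)), pvF (radSieve L) a (c - a) := by
        refine Finset.sum_congr rfl (fun c _ => ?_)
        rw [pv_stride_sum _ _ _ _ one_pos, Finset.filter_true_of_mem (fun t _ => one_dvd _),
          Finset.sum_filter]
        exact Finset.sum_congr rfl (fun a _ => pv_pvG_eq L c a)
    _ = ∑ c ∈ Finset.Ico (1:Int) L,
          ∑ a ∈ (Finset.Ico (1:Int) L).filter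
            (fun a => a < c - a ∧ (c % 2 = 1 ∨ a % 2 = 1)), pvF (radSieve L) a (c - a) := by
        refine Finset.sum_subset ?_ ?_
        · intro x hx; simp only [Finset.mem_Ico] at *; omega
        · intro c hc hnc
          simp only [Finset.mem_Ico] at hc hnc
          rw [Finset.filter_eq_empty_iff.2 ?_, Finset.sum_empty]
          intro a ha
          simp only [Finset.mem_Ico] at ha
          omega
    _ = ∑ p ∈ pvS L, pvF (radSieve L) p.1 p.2 := by
        symm
        unfold pvS
        have hT : ∑ p ∈ (Finset.Ico 1 L ×ˢ Finset.Ico 1 L).filter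
              (fun p => p.1 < p.2 ∧ p.1 + p.2 < L ∧ (p.1 % 2 = 1 ∨ p.2 % 2 = 1)),
              pvF (radSieve L) p.1 p.2
            = ∑ q ∈ (Finset.Ico 1 L ×ˢ Finset.Ico 1 L).filter
              (fun q => q.2 < q.1 - q.2 ∧ (q.1 % 2 = 1 ∨ q.2 % 2 = 1)),
              pvF (radSieve L) q.2 (q.1 - q.2) := by
          refine Finset.sum_nbij' (i := fun p => (p.1 + p.2, p.1)) (j := fun q => (q.2, q.1 - q.2))
            ?_ ?_ ?_ ?_ ?_
          · intro p hp
            simp only [Finset.mem_filter, Finset.mem_product, Finset.mem_Ico] at hp ⊢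
            omega
          · intro q hq
            simp only [Finset.mem_filter, Finset.mem_product, Finset.mem_Ico] at hq ⊢
            omega
          · intro p _
            obtain ⟨x, y⟩ := p
            simp
          · intro q _
            obtain ⟨x, y⟩ := q
            simp
          · intro p _
            obtain ⟨x, y⟩ := p
            have hx : x + y - x = y := by ring
            simp only [hx]
        rw [hT]
        have hprod := Finset.sum_product' (s := Finset.Ico (1:Int) L) (t := Finset.Ico (1:Int) L)
            (f := fun c a => if a < c - a ∧ (c % 2 = 1 ∨ a % 2 = 1)
                  then pvF (radSieve L) a (c - a) else 0)
        rw [Finset.sum_filter, hprod]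
        exact Finset.sum_congr rfl (fun c _ => (Finset.sum_filter _ _).symm)

-- ===== VERDICT (by name: the statement is the Claim_ definition above) =====
theorem solve_spec : Claim_equal_solve := by
  intro limit _
  unfold Spec_solve
  rw [pv_A_eq, pv_B_eq]
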